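-- pv_equiv track=rewrite | github.com/Kimiaoo/unsw | 19T3 COMP9021/Quiz/quiz_7.py | check_around
-- ===== SOURCE A (Python) =====
-- def check_around(shape, col):
--     direction = [(0, 1), (0, -1), (-1, 0), (1, 0)]
--     spikes = 0
--     for cur_x in range(len(shape)):
--         for cur_y in range(len(shape[0])):
--             if shape[cur_x][cur_y] == col:
--                 count_col = 0
--                 for (dir_x, dir_y) in direction:
--                     around_x = cur_x + dir_x
--                     around_y = cur_y + dir_y
--                     if 0 <= around_x < len(shape) and 0 <= around_y < len(shape[0]):
--                         if shape[around_x][around_y] == col: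
--                             count_col += 1
--                 if count_col == 1:
--                     spikes += 1
--     return spikes
-- ===== SOURCE B (Python) =====
-- def check_around(shape, col):
--     if len(shape) == 0:
--         return 0
--     h = len(shape)
--     w = len(shape[0])
--     ends = []
--     for x in range(h):
--         for y in range(w - 1):
--             ends.extend([(x, y), (x, y + 1)]
--                         if shape[x][y] == col and shape[x][y + 1] == col else [])
--     for x in range(h - 1):
--         for y in range(w):
--             ends.extend([(x, y), (x + 1, y)]
--                         if shape[x][y] == col and shape[x + 1][y] == col else [])
--     counts = {}
--     for p in ends:
--         counts[p] = counts.get(p, 0) + 1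
--     spikes = 0
--     for x in range(h):
--         for y in range(w):
--             if shape[x][y] == col and counts.get((x, y), 0) == 1:
--                 spikes += 1
--     return spikes
-- ===== Notes on version B (the rewrite author's own statement) =====
-- stated objective: alternative
-- what changed: B replaces A's per-cell scan of the four neighbours by a single sweep over all horizontally and vertically adjacent pairs that tallies monochromatic-edge endpoints in a dictionary, then counts the cells of the colour whose tally is exactly 1.
import Mathlib
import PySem

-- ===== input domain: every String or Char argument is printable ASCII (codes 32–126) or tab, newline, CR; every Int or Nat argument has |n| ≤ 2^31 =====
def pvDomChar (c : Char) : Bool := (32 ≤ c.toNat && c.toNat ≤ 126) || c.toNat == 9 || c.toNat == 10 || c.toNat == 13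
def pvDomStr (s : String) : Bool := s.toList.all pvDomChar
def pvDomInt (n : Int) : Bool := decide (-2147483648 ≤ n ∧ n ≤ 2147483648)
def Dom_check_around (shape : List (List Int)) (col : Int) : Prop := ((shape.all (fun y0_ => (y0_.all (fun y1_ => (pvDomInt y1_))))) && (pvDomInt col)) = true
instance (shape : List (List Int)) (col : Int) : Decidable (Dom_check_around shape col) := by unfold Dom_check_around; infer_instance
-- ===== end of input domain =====

-- B counts endpoints of monochromatic adjacent pairs in one sweep over all horizontal and
-- vertical edges instead of re-scanning the four neighbours of every cell (alternative
-- decomposition, same asymptotic cost).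

-- ===== PORT A =====
-- shared helper: shape[x][y] as a total lookup (exact wherever Pre_ holds: both ports only
-- evaluate it at indices the precondition puts in range)
def pvAt (shape : List (List Int)) (x y : Int) : Int :=
  PySem.List.pyGetD (PySem.List.pyGetD shape x []) y 0


def check_around (shape : List (List Int)) (col : Int) : Int :=
  let direction : List (Int × Int) := [(0, 1), (0, -1), (-1, 0), (1, 0)]
  (PySem.List.pyRange 0 (shape.length : Int) 1).foldl (fun spikes cur_x =>
    (PySem.List.pyRange 0 ((shape.headD []).length : Int) 1).foldl (fun spikes cur_y =>
      if pvAt shape cur_x cur_y == col then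
        let count_col := direction.foldl (fun count_col d =>
          let around_x := cur_x + d.1
          let around_y := cur_y + d.2
          if (0 ≤ around_x ∧ around_x < (shape.length : Int)) ∧
             (0 ≤ around_y ∧ around_y < ((shape.headD []).length : Int)) then
            if pvAt shape around_x around_y == col then count_col + 1 else count_col
          else count_col) (0 : Int)
        if count_col == 1 then spikes + 1 else spikes
      else spikes) spikes) 0

-- ===== PORT B =====
def check_around_alt (shape : List (List Int)) (col : Int) : Int :=
  if shape = [] then 0 else
  let h : Int := shape.length
  let w : Int := (shape.headD []).length
  let ends : List (Int × Int) :=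
    (PySem.List.pyRange 0 h 1).foldl (fun acc x =>
      (PySem.List.pyRange 0 (w - 1) 1).foldl (fun acc y =>
        acc ++ (if pvAt shape x y == col && pvAt shape x (y + 1) == col
                then [(x, y), (x, y + 1)] else [])) acc) []
  let ends2 : List (Int × Int) :=
    (PySem.List.pyRange 0 (h - 1) 1).foldl (fun acc x =>
      (PySem.List.pyRange 0 w 1).foldl (fun acc y =>
        acc ++ (if pvAt shape x y == col && pvAt shape (x + 1) y == col
                then [(x, y), (x + 1, y)] else [])) acc) ends
  let counts : PySem.Dict (Int × Int) Int :=
    ends2.foldl (fun d p => d.modify p 0 (· + 1)) PySem.Dict.empty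
  (PySem.List.pyRange 0 h 1).foldl (fun spikes x =>
    (PySem.List.pyRange 0 w 1).foldl (fun spikes y =>
      if pvAt shape x y == col && counts.getD (x, y) 0 == 1 then spikes + 1
      else spikes) spikes) 0


-- ===== PRECONDITION & SPEC =====
-- Pre_ excludes exactly the ragged grids whose first row is longer than some later row:
-- there Python A raises IndexError (it indexes every row up to len(shape[0])), and B raises too.
def Pre_check_around (shape : List (List Int)) (col : Int) : Prop :=
  ∀ row ∈ shape, (shape.headD []).length ≤ row.length
instance (shape : List (List Int)) (col : Int) : Decidable (Pre_check_around shape col) := by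
  unfold Pre_check_around; infer_instance
def pvWitness_check_around : List (List Int) × Int := ([[1, 0], [1, 1], [0, 1]], 1)

def Spec_check_around (shape : List (List Int)) (col : Int) (out : Int) : Prop := out = check_around_alt shape col
instance (shape : List (List Int)) (col : Int) (out : Int) : Decidable (Spec_check_around shape col out) := by unfold Spec_check_around; infer_instance

-- ===== CLAIM (what is proved, stated in full; the proofs are below) =====
def Claim_equal_check_around : Prop := ∀ (shape : List (List Int)) (col : Int), Dom_check_around shape col → Pre_check_around shape col → Spec_check_around shape col (check_around shape col)

-- ===== LEMMAS AND PROOFS =====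

def pvEH (shape : List (List Int)) (col : Int) : List (Int × Int) :=
  (PySem.List.pyRange 0 (shape.length : Int) 1).flatMap (fun x =>
    (PySem.List.pyRange 0 (((shape.headD []).length : Int) - 1) 1).flatMap (fun y =>
      if pvAt shape x y == col && pvAt shape x (y + 1) == col
      then [(x, y), (x, y + 1)] else []))

def pvEV (shape : List (List Int)) (col : Int) : List (Int × Int) :=
  (PySem.List.pyRange 0 ((shape.length : Int) - 1) 1).flatMap (fun x =>
    (PySem.List.pyRange 0 ((shape.headD []).length : Int) 1).flatMap (fun y =>
      if pvAt shape x y == col && pvAt shape (x + 1) y == col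
      then [(x, y), (x + 1, y)] else []))



theorem pv_sum_two {f : Int → Nat} {l : List Int} (hl : l.Nodup) (t₁ t₂ : Int) (hne : t₁ ≠ t₂)
    (hsupp : ∀ y ∈ l, y ≠ t₁ → y ≠ t₂ → f y = 0) :
    (l.map f).sum = (if t₁ ∈ l then f t₁ else 0) + (if t₂ ∈ l then f t₂ else 0) := by
  induction l with
  | nil => simp
  | cons a l ih =>
    rcases List.nodup_cons.mp hl with ⟨ha, hl'⟩
    have ih' := ih hl' (fun y hy => hsupp y (List.mem_cons_of_mem _ hy))
    simp only [List.map_cons, List.sum_cons, ih', List.mem_cons]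
    by_cases h1 : a = t₁
    · subst h1; simp [ha, Ne.symm hne]
    · by_cases h2 : a = t₂
      · subst h2; simp [ha, Ne.symm h1]; omega
      · have hfa : f a = 0 := hsupp a (List.mem_cons_self) h1 h2
        simp [hfa, Ne.symm h1, Ne.symm h2]

theorem pv_sum_point {f : Int → Nat} {l : List Int} (hl : l.Nodup) (t : Int)
    (hsupp : ∀ y ∈ l, y ≠ t → f y = 0) :
    (l.map f).sum = if t ∈ l then f t else 0 := by
  induction l with
  | nil => simp
  | cons a l ih =>
    rcases List.nodup_cons.mp hl with ⟨ha, hl'⟩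
    have ih' := ih hl' (fun y hy => hsupp y (List.mem_cons_of_mem _ hy))
    simp only [List.map_cons, List.sum_cons, ih', List.mem_cons]
    by_cases h1 : a = t
    · subst h1; simp [ha]
    · have hfa : f a = 0 := hsupp a (List.mem_cons_self) h1
      simp [hfa, Ne.symm h1]


theorem pv_ite_merge {X M E : Prop} [Decidable X] [Decidable M] [Decidable E] (hX : X) :
    (if M then (if E then (1 : Nat) else 0) else 0) = if X ∧ M ∧ E then 1 else 0 := by
  by_cases hM : M <;> by_cases hE : E <;> simp [hX, hM, hE]


theorem pv_countEH (shape : List (List Int)) (col x0 y0 : Int) :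
    (pvEH shape col).count (x0, y0)
      = (if (0 ≤ x0 ∧ x0 < (shape.length : Int)) ∧ (0 ≤ y0 ∧ y0 < ((shape.headD []).length : Int) - 1)
            ∧ (pvAt shape x0 y0 == col && pvAt shape x0 (y0 + 1) == col) = true then 1 else 0)
      + (if (0 ≤ x0 ∧ x0 < (shape.length : Int)) ∧ (0 ≤ y0 - 1 ∧ y0 - 1 < ((shape.headD []).length : Int) - 1)
            ∧ (pvAt shape x0 (y0 - 1) == col && pvAt shape x0 y0 == col) = true then 1 else 0) := by
  have hsX : ∀ x ∈ PySem.List.pyRange 0 (shape.length : Int) 1, x ≠ x0 →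
      List.count (x0, y0) (List.flatMap (fun y =>
        if pvAt shape x y == col && pvAt shape x (y + 1) == col
        then [(x, y), (x, y + 1)] else []) (PySem.List.pyRange 0 (((shape.headD []).length : Int) - 1) 1)) = 0 := by
    intro x hx hxne
    rw [List.count_eq_zero]
    simp only [List.mem_flatMap]
    rintro ⟨y, hy, hmem⟩
    revert hmem
    split <;> simp_all [Prod.ext_iff] <;> omega
  have hsY : ∀ y ∈ PySem.List.pyRange 0 (((shape.headD []).length : Int) - 1) 1, y ≠ y0 → y ≠ y0 - 1 →
      List.count (x0, y0) (if pvAt shape x0 y == col && pvAt shape x0 (y + 1) == col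
        then [(x0, y), (x0, y + 1)] else []) = 0 := by
    intro y hy h1 h2
    rw [List.count_eq_zero]
    split <;> simp_all [Prod.ext_iff] <;> omega
  have f1 : List.count (x0, y0) (if pvAt shape x0 y0 == col && pvAt shape x0 (y0 + 1) == col
        then [(x0, y0), (x0, y0 + 1)] else [])
      = if (pvAt shape x0 y0 == col && pvAt shape x0 (y0 + 1) == col) = true then 1 else 0 := by
    split <;> simp [Prod.ext_iff]
  have f2 : List.count (x0, y0) (if pvAt shape x0 (y0 - 1) == col && pvAt shape x0 (y0 - 1 + 1) == col
        then [(x0, y0 - 1), (x0, y0 - 1 + 1)] else [])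
      = if (pvAt shape x0 (y0 - 1) == col && pvAt shape x0 y0 == col) = true then 1 else 0 := by
    have : y0 - 1 + 1 = y0 := by omega
    rw [this]
    split <;> simp [Prod.ext_iff]
  unfold pvEH
  rw [List.count_flatMap]
  simp only [Function.comp_def]
  rw [pv_sum_point (PySem.List.nodup_pyRange_one 0 _) x0 hsX]
  simp only [PySem.List.mem_pyRange_one]
  by_cases hx : 0 ≤ x0 ∧ x0 < (shape.length : Int)
  · rw [if_pos hx]
    rw [List.count_flatMap]
    simp only [Function.comp_def]
    rw [pv_sum_two (PySem.List.nodup_pyRange_one 0 _) y0 (y0 - 1) (by omega) hsY]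
    simp only [PySem.List.mem_pyRange_one]
    clear hsX hsY
    rw [f1, f2]
    clear f1 f2
    congr 1 <;> exact pv_ite_merge hx
  · rw [if_neg hx]
    rw [if_neg (fun h => hx h.1), if_neg (fun h => hx h.1)]

theorem pv_countEV (shape : List (List Int)) (col x0 y0 : Int) :
    (pvEV shape col).count (x0, y0)
      = (if (0 ≤ x0 ∧ x0 < (shape.length : Int) - 1) ∧ (0 ≤ y0 ∧ y0 < ((shape.headD []).length : Int))
            ∧ (pvAt shape x0 y0 == col && pvAt shape (x0 + 1) y0 == col) = true then 1 else 0)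
      + (if (0 ≤ x0 - 1 ∧ x0 - 1 < (shape.length : Int) - 1) ∧ (0 ≤ y0 ∧ y0 < ((shape.headD []).length : Int))
            ∧ (pvAt shape (x0 - 1) y0 == col && pvAt shape x0 y0 == col) = true then 1 else 0) := by
  have hsX : ∀ x ∈ PySem.List.pyRange 0 ((shape.length : Int) - 1) 1, x ≠ x0 → x ≠ x0 - 1 →
      List.count (x0, y0) (List.flatMap (fun y =>
        if pvAt shape x y == col && pvAt shape (x + 1) y == col
        then [(x, y), (x + 1, y)] else []) (PySem.List.pyRange 0 ((shape.headD []).length : Int) 1)) = 0 := by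
    intro x hx h1 h2
    rw [List.count_eq_zero]
    simp only [List.mem_flatMap]
    rintro ⟨y, hy, hmem⟩
    revert hmem
    split <;> simp_all [Prod.ext_iff] <;> omega
  have hsY1 : ∀ y ∈ PySem.List.pyRange 0 ((shape.headD []).length : Int) 1, y ≠ y0 →
      List.count (x0, y0) (if pvAt shape x0 y == col && pvAt shape (x0 + 1) y == col
        then [(x0, y), (x0 + 1, y)] else []) = 0 := by
    intro y hy h1
    rw [List.count_eq_zero]
    split <;> simp_all [Prod.ext_iff] <;> omega
  have hsY2 : ∀ y ∈ PySem.List.pyRange 0 ((shape.headD []).length : Int) 1, y ≠ y0 →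
      List.count (x0, y0) (if pvAt shape (x0 - 1) y == col && pvAt shape (x0 - 1 + 1) y == col
        then [(x0 - 1, y), (x0 - 1 + 1, y)] else []) = 0 := by
    intro y hy h1
    rw [List.count_eq_zero]
    split <;> simp_all [Prod.ext_iff] <;> omega
  have f1 : List.count (x0, y0) (if pvAt shape x0 y0 == col && pvAt shape (x0 + 1) y0 == col
        then [(x0, y0), (x0 + 1, y0)] else [])
      = if (pvAt shape x0 y0 == col && pvAt shape (x0 + 1) y0 == col) = true then 1 else 0 := by
    split <;> simp [Prod.ext_iff]
  have f2 : List.count (x0, y0) (if pvAt shape (x0 - 1) y0 == col && pvAt shape (x0 - 1 + 1) y0 == col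
        then [(x0 - 1, y0), (x0 - 1 + 1, y0)] else [])
      = if (pvAt shape (x0 - 1) y0 == col && pvAt shape x0 y0 == col) = true then 1 else 0 := by
    have h : x0 - 1 + 1 = x0 := by omega
    rw [h]
    split <;> simp [Prod.ext_iff] <;> omega
  unfold pvEV
  rw [List.count_flatMap]
  simp only [Function.comp_def]
  rw [pv_sum_two (PySem.List.nodup_pyRange_one 0 _) x0 (x0 - 1) (by omega) hsX]
  simp only [PySem.List.mem_pyRange_one]
  clear hsX
  congr 1
  · by_cases hm : 0 ≤ x0 ∧ x0 < (shape.length : Int) - 1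
    · rw [if_pos hm]
      rw [List.count_flatMap]
      simp only [Function.comp_def]
      rw [pv_sum_point (PySem.List.nodup_pyRange_one 0 _) y0 hsY1]
      simp only [PySem.List.mem_pyRange_one]
      rw [f1]
      exact pv_ite_merge hm
    · rw [if_neg hm, if_neg (fun h => hm h.1)]
  · by_cases hm : 0 ≤ x0 - 1 ∧ x0 - 1 < (shape.length : Int) - 1
    · rw [if_pos hm]
      rw [List.count_flatMap]
      simp only [Function.comp_def]
      rw [pv_sum_point (PySem.List.nodup_pyRange_one 0 _) y0 hsY2]
      simp only [PySem.List.mem_pyRange_one]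
      rw [f2]
      exact pv_ite_merge hm
    · rw [if_neg hm, if_neg (fun h => hm h.1)]

theorem pv_step (c : Int) (P : Prop) [Decidable P] (b : Bool) :
    (if P then (if b = true then c + 1 else c) else c) = c + (if P ∧ b = true then 1 else 0) := by
  split_ifs <;> simp_all

theorem pv_deg (shape : List (List Int)) (col x y : Int)
    (hx : 0 ≤ x ∧ x < (shape.length : Int))
    (hy : 0 ≤ y ∧ y < ((shape.headD []).length : Int))
    (hg : (pvAt shape x y == col) = true) :
    (List.foldl (fun count_col d =>
        if (0 ≤ x + d.1 ∧ x + d.1 < (shape.length : Int)) ∧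
           0 ≤ y + d.2 ∧ y + d.2 < ((shape.headD []).length : Int) then
          if (pvAt shape (x + d.1) (y + d.2) == col) = true then count_col + 1 else count_col
        else count_col)
      (0 : Int) [(0, 1), (0, -1), (-1, 0), (1, 0)])
    = (((if (0 ≤ x ∧ x < (shape.length : Int)) ∧ (0 ≤ y ∧ y < ((shape.headD []).length : Int) - 1)
            ∧ (pvAt shape x y == col && pvAt shape x (y + 1) == col) = true then 1 else 0)
      + (if (0 ≤ x ∧ x < (shape.length : Int)) ∧ (0 ≤ y - 1 ∧ y - 1 < ((shape.headD []).length : Int) - 1)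
            ∧ (pvAt shape x (y - 1) == col && pvAt shape x y == col) = true then 1 else 0)
      + ((if (0 ≤ x ∧ x < (shape.length : Int) - 1) ∧ (0 ≤ y ∧ y < ((shape.headD []).length : Int))
            ∧ (pvAt shape x y == col && pvAt shape (x + 1) y == col) = true then 1 else 0)
      + (if (0 ≤ x - 1 ∧ x - 1 < (shape.length : Int) - 1) ∧ (0 ≤ y ∧ y < ((shape.headD []).length : Int))
            ∧ (pvAt shape (x - 1) y == col && pvAt shape x y == col) = true then 1 else 0)) : Nat) : Int) := by
  have e0 : x + (0 : Int) = x := by ring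
  have ey0 : y + (0 : Int) = y := by ring
  have eym : y + (-1 : Int) = y - 1 := by ring
  have exm : x + (-1 : Int) = x - 1 := by ring
  simp only [List.foldl, pv_step, e0, ey0, eym, exm, zero_add]
  push_cast
  have t1 : (if (0 ≤ x ∧ x < (shape.length : Int)) ∧ 0 ≤ y + 1 ∧ y + 1 < ((shape.headD []).length : Int)
        then (if (pvAt shape x (y + 1) == col) = true then (1 : Int) else 0) else 0)
      = (if (0 ≤ x ∧ x < (shape.length : Int)) ∧ (0 ≤ y ∧ y < ((shape.headD []).length : Int) - 1)
        ∧ (pvAt shape x y == col && pvAt shape x (y + 1) == col) = true then 1 else 0) := by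
    by_cases hb : (pvAt shape x (y + 1) == col) = true <;>
      simp only [hb, hg, Bool.true_and, Bool.and_true, Bool.and_false, and_true, and_false] <;>
      split_ifs <;> first | rfl | omega | tauto
  have t2 : (if ((0 ≤ x ∧ x < (shape.length : Int)) ∧ 0 ≤ y - 1 ∧ y - 1 < ((shape.headD []).length : Int))
        ∧ (pvAt shape x (y - 1) == col) = true then (1 : Int) else 0)
      = (if (0 ≤ x ∧ x < (shape.length : Int)) ∧ (0 ≤ y - 1 ∧ y - 1 < ((shape.headD []).length : Int) - 1)
        ∧ (pvAt shape x (y - 1) == col && pvAt shape x y == col) = true then 1 else 0) := by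
    by_cases hb : (pvAt shape x (y - 1) == col) = true <;>
      simp only [hb, hg, Bool.true_and, Bool.and_true, Bool.and_false, and_true, and_false] <;>
      split_ifs <;> first | rfl | omega | tauto
  have t3 : (if ((0 ≤ x - 1 ∧ x - 1 < (shape.length : Int)) ∧ 0 ≤ y ∧ y < ((shape.headD []).length : Int))
        ∧ (pvAt shape (x - 1) y == col) = true then (1 : Int) else 0)
      = (if (0 ≤ x - 1 ∧ x - 1 < (shape.length : Int) - 1) ∧ (0 ≤ y ∧ y < ((shape.headD []).length : Int))
        ∧ (pvAt shape (x - 1) y == col && pvAt shape x y == col) = true then 1 else 0) := by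
    by_cases hb : (pvAt shape (x - 1) y == col) = true <;>
      simp only [hb, hg, Bool.true_and, Bool.and_true, Bool.and_false, and_true, and_false] <;>
      split_ifs <;> first | rfl | omega | tauto
  have t4 : (if ((0 ≤ x + 1 ∧ x + 1 < (shape.length : Int)) ∧ 0 ≤ y ∧ y < ((shape.headD []).length : Int))
        ∧ (pvAt shape (x + 1) y == col) = true then (1 : Int) else 0)
      = (if (0 ≤ x ∧ x < (shape.length : Int) - 1) ∧ (0 ≤ y ∧ y < ((shape.headD []).length : Int))
        ∧ (pvAt shape x y == col && pvAt shape (x + 1) y == col) = true then 1 else 0) := by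
    by_cases hb : (pvAt shape (x + 1) y == col) = true <;>
      simp only [hb, hg, Bool.true_and, Bool.and_true, Bool.and_false, and_true, and_false] <;>
      split_ifs <;> first | rfl | omega | tauto
  rw [t1, t2, t3, t4]
  ring

theorem pv_main (shape : List (List Int)) (col : Int) :
    check_around shape col = check_around_alt shape col := by
  by_cases hs : shape = []
  · subst hs
    simp [check_around, check_around_alt, PySem.List.pyRange_one_eq_nil]
  · unfold check_around check_around_alt
    rw [if_neg hs]
    simp only [PySem.List.foldl_append_eq_flatMap, List.nil_append,
      PySem.Dict.getD_foldl_modify_add_one]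
    apply PySem.List.foldl_congr_mem
    intro spikes x hx
    apply PySem.List.foldl_congr_mem
    intro s y hy
    rw [PySem.List.mem_pyRange_one] at hx hy
    have hz : PySem.Dict.empty.getD ((x, y)) (0 : Int) = 0 := rfl
    have hEH := pv_countEH shape col x y
    have hEV := pv_countEV shape col x y
    unfold pvEH at hEH
    unfold pvEV at hEV
    rw [hz, zero_add, List.count_append, hEH, hEV]
    by_cases hg : (pvAt shape x y == col) = true
    · rw [pv_deg shape col x y hx hy hg, hg]
      simp only [Bool.true_and, Bool.and_true]
      simp only [if_true]
    · simp [hg]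

-- ===== VERDICT (by name: the statement is the Claim_ definition above) =====
theorem check_around_spec : Claim_equal_check_around := by
  intro shape col _ _
  unfold Spec_check_around
  exact pv_main shape col
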